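-- pv_equiv track=rewrite | github.com/Dima3108/interpreting_launges | vs/PythonApplications/Lab1_task3.py | task_15
-- ===== SOURCE A (Python) =====
-- def task_15(str):
--     count = 0
--     i = 0
--     while (i < len(str)):
--         if (str[i] >= '6' and str[i] <= '9'):
--             count = count + 1
--         i = i + 1
--     return count
-- ===== SOURCE B (Python) =====
-- def task_15(str):
--     return sum(str.count(d) for d in '6789')
-- ===== Notes on version B (the rewrite author's own statement) =====
-- stated objective: idiomatic
-- what changed: Replaces the manual index-driven while loop with a per-character range test by summing the built-in str.count tally for each of the four target digits.
import Mathlib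
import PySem

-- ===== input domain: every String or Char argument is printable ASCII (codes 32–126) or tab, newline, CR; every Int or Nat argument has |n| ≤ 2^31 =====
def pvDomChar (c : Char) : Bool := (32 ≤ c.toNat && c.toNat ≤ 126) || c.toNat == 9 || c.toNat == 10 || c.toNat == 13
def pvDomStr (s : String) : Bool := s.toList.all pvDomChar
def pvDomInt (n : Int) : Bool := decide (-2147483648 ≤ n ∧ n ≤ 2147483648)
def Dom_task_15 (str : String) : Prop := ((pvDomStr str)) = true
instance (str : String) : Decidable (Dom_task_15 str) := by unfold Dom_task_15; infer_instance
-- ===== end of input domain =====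

-- B replaces A's single index-driven while loop (per-character range test) by four
-- library str.count scans, one per target digit, summed — objective: idiomatic.

-- ===== PORT A =====
-- while (i < len(str)): if str[i] >= '6' and str[i] <= '9': count = count + 1; i = i + 1
def task15Loop (cs : List Char) (count : Int) (i : Nat) : Int :=
  if h : i < cs.length then
    task15Loop cs (if '6' ≤ cs[i] ∧ cs[i] ≤ '9' then count + 1 else count) (i + 1)
  else count
termination_by cs.length - i

def task_15 (str : String) : Int := task15Loop str.toList 0 0

-- ===== PORT B =====
-- return sum(str.count(d) for d in '6789')
def task_15_alt (str : String) : Int :=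
  (("6789".toList).map (fun d => (PySem.Str.count str (String.mk [d]) : Int))).sum

-- ===== PRECONDITION & SPEC =====
def Spec_task_15 (str : String) (out : Int) : Prop := out = task_15_alt str
instance (str : String) (out : Int) : Decidable (Spec_task_15 str out) := by unfold Spec_task_15; infer_instance

-- ===== CLAIM (what is proved, stated in full; the proofs are below) =====
def Claim_equal_task_15 : Prop := ∀ (str : String), Dom_task_15 str → Spec_task_15 str (task_15 str)

-- ===== LEMMAS AND PROOFS =====

-- A's loop counts the characters in ['6','9'] among the suffix of cs from index i.
theorem task15Loop_eq (cs : List Char) (count : Int) (i : Nat) :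
    task15Loop cs count i =
      count + (((cs.drop i).countP (fun c => decide ('6' ≤ c ∧ c ≤ '9'))) : Int) := by
  fun_induction task15Loop with
  | case1 count i h ih =>
    rw [List.drop_eq_getElem_cons h, List.countP_cons]
    simp only [dite_eq_ite] at ih
    rw [ih]
    by_cases hc : '6' ≤ cs[i] ∧ cs[i] ≤ '9' <;> simp [hc] <;> push_cast <;> ring
  | case2 count i h =>
    rw [List.drop_eq_nil_of_le (Nat.le_of_not_lt h)]
    simp

-- the range test '6' ≤ c ≤ '9' holds exactly for the four digit characters
theorem range_iff (c : Char) : ('6' ≤ c ∧ c ≤ '9') ↔ (c = '6' ∨ c = '7' ∨ c = '8' ∨ c = '9') := by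
  have hle : ∀ a b : Char, a ≤ b ↔ a.toNat ≤ b.toNat := fun a b => ge_iff_le.symm.trans ge_iff_le
  have heq : ∀ a b : Char, a = b ↔ a.toNat = b.toNat := fun a b => eq_iff_eq_of_cmp_eq_cmp rfl
  rw [hle, hle, heq, heq, heq, heq]
  simp only [show ('6':Char).toNat = 54 from rfl, show ('7':Char).toNat = 55 from rfl,
    show ('8':Char).toNat = 56 from rfl, show ('9':Char).toNat = 57 from rfl]
  omega

theorem countP_range_split (cs : List Char) :
    (cs.countP (fun c => decide ('6' ≤ c ∧ c ≤ '9'))) =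
      cs.count '6' + cs.count '7' + cs.count '8' + cs.count '9' := by
  induction cs with
  | nil => simp
  | cons h t ih =>
    simp only [List.countP_cons, List.count_cons, ih]
    by_cases hp : '6' ≤ h ∧ h ≤ '9'
    · rcases (range_iff h).1 hp with e|e|e|e <;> subst e <;> simp <;> omega
    · have hne := fun e => hp ((range_iff h).2 e)
      have h6 : ¬ h = '6' := fun e => hne (Or.inl e)
      have h7 : ¬ h = '7' := fun e => hne (Or.inr (Or.inl e))
      have h8 : ¬ h = '8' := fun e => hne (Or.inr (Or.inr (Or.inl e)))
      have h9 : ¬ h = '9' := fun e => hne (Or.inr (Or.inr (Or.inr e)))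
      simp [hp, h6, h7, h8, h9]

-- Python str.count with a single-character needle is plain character counting.
theorem go_singleton (c : Char) : ∀ (fuel : Nat) (cs : List Char) (acc : Nat), cs.length ≤ fuel →
    PySem.Chars.count.go [c] fuel cs acc = acc + cs.count c := by
  intro fuel
  induction fuel with
  | zero => intro cs acc h; cases cs with
    | nil => simp [PySem.Chars.count.go]
    | cons a t => simp at h
  | succ n ih => intro cs acc h; cases cs with
    | nil => simp [PySem.Chars.count.go]
    | cons a t =>
      rw [PySem.Chars.count.go]
      by_cases e : c = a
      · subst e
        simp only [List.isPrefixOf, beq_self_eq_true, if_true]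
        rw [ih _ _ (by simpa using h)]
        simp [List.count_cons]
        omega
      · have hpf : ([c].isPrefixOf (a :: t)) = false := by
          simp only [List.isPrefixOf, List.isPrefixOf_nil_left, Bool.and_true]
          exact beq_eq_false_iff_ne.2 e
        rw [hpf]
        simp only [Bool.false_eq_true, if_false]
        rw [ih _ _ (by simpa using h)]
        have : (a == c) = false := beq_eq_false_iff_ne.2 (fun e' => e (Eq.symm e'))
        simp [List.count_cons, this]

theorem chars_count_singleton (cs : List Char) (c : Char) :
    PySem.Chars.count cs [c] = cs.count c := by
  simpa [PySem.Chars.count] using go_singleton c cs.length cs 0 le_rfl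

-- ===== VERDICT (by name: the statement is the Claim_ definition above) =====
theorem task_15_spec : Claim_equal_task_15 := by
  intro s _
  unfold Spec_task_15 task_15 task_15_alt
  rw [task15Loop_eq, countP_range_split]
  have h : ∀ c : Char, (String.mk [c]).toList = [c] := fun _ => String.toList_ofList
  simp [PySem.Str.count_eq, h, chars_count_singleton]
  push_cast
  ring
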